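-- pv_equiv track=rewrite | github.com/lovodkin93/attribute-first-then-generate | few_shot_experiments/run_iterative_sent_gen.py | keep_specific_occurrences
-- ===== SOURCE A (Python) =====
-- def keep_specific_occurrences(s, substring, occurrences):
--     """Keep only specific occurrences of a substring in a string."""
--     parts = []
--     count = 0
--     last_index = 0
--     while True:
--         index = s.find(substring, last_index)
--         if index == -1:
--             # Append the remaining part of the string
--             parts.append(s[last_index:])
--             break
--         count += 1
--         if count in occurrences:
--             # Include the substring in the result
--             parts.append(s[last_index:index + len(substring)])
--         else:
--             # Exclude the substring from the result
--             parts.append(s[last_index:index])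
--         # Update the last index
--         last_index = index + len(substring)
--     return ''.join(parts)
-- ===== SOURCE B (Python) =====
-- def keep_specific_occurrences(s, substring, occurrences):
--     """Keep only specific occurrences of a substring in a string."""
--     parts = s.split(substring)
--     pieces = [parts[0]]
--     for i, part in enumerate(parts[1:], start=1):
--         if i in occurrences:
--             pieces.append(substring)
--         pieces.append(part)
--     return ''.join(pieces)
-- ===== Notes on version B (the rewrite author's own statement) =====
-- stated objective: idiomatic
-- what changed: B replaces A's manual find/count/slice while-loop with split(substring) followed by one reassembly pass that re-inserts the separator at the kept occurrence numbers; Pre_ excludes substring == '', on which A loops forever (never returns) and B's split('') raises ValueError.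
import Mathlib
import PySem

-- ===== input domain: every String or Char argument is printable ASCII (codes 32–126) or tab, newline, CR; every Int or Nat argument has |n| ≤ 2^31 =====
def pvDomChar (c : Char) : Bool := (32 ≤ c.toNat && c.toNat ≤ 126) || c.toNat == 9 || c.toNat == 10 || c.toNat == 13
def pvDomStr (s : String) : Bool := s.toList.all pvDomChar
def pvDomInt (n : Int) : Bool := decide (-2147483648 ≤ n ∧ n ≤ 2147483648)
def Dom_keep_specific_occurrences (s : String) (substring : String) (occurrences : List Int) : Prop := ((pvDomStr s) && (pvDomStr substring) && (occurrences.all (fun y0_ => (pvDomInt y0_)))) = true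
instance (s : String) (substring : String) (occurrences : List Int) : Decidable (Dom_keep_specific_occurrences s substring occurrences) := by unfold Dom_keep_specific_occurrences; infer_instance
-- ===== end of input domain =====

-- B keeps the specified occurrences by splitting on the substring and re-inserting it at the
-- kept occurrence numbers during one reassembly pass (idiomatic decomposition; same cost as A).

-- ===== PORT A =====
-- A's while-True loop: state (count, last_index, parts); fuel s.length + 1 only makes the
-- recursion total (under Pre_ the fuel never runs out, see goA lemmas below the claim block).
def goA (s sub : List Char) (occ : List Int) : Nat → Nat → Int → List (List Char) → List (List Char)
  | 0, _, _, parts => parts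
  | fuel + 1, count, lastIndex, parts =>
    let index := PySem.Chars.findFrom s sub lastIndex none
    if index = -1 then
      parts ++ [PySem.Chars.slice s (some lastIndex) none]
    else
      let count' := count + 1
      if ((count' : Int)) ∈ occ then
        goA s sub occ fuel count' (index + sub.length)
          (parts ++ [PySem.Chars.slice s (some lastIndex) (some (index + sub.length))])
      else
        goA s sub occ fuel count' (index + sub.length)
          (parts ++ [PySem.Chars.slice s (some lastIndex) (some index)])

def keep_specific_occurrences (s : String) (substring : String) (occurrences : List Int) : String :=
  String.ofList (PySem.Chars.join [] (goA s.toList substring.toList occurrences (s.toList.length + 1) 0 0 []))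

-- ===== PORT B =====
-- Source B's for-loop over enumerate(parts[1:], start=1), building `pieces`.
def goB (sub : List Char) (occ : List Int) : Nat → List (List Char) → List (List Char) → List (List Char)
  | _, pieces, [] => pieces
  | i, pieces, p :: rest =>
    let pieces := if ((i : Int)) ∈ occ then pieces ++ [sub] else pieces
    goB sub occ (i + 1) (pieces ++ [p]) rest

def keep_specific_occurrences_alt (s : String) (substring : String) (occurrences : List Int) : String :=
  match PySem.Chars.splitOn s.toList substring.toList with
  | [] => ""   -- unreachable: split never returns an empty list
  | p0 :: rest => String.ofList (PySem.Chars.join [] (goB substring.toList occurrences 1 [p0] rest))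

-- ===== PRECONDITION & SPEC =====
-- Pre_ excludes substring = "": there A's while-loop never terminates (s.find('', i) returns i
-- forever), so A returns no value, and B's s.split('') raises ValueError.
def Pre_keep_specific_occurrences (s : String) (substring : String) (occurrences : List Int) : Prop :=
  substring ≠ ""
instance (s : String) (substring : String) (occurrences : List Int) : Decidable (Pre_keep_specific_occurrences s substring occurrences) := by unfold Pre_keep_specific_occurrences; infer_instance

def pvWitness_keep_specific_occurrences : String × String × List Int := ("abcabcab", "ab", [2])

def Spec_keep_specific_occurrences (s : String) (substring : String) (occurrences : List Int) (out : String) : Prop := out = keep_specific_occurrences_alt s substring occurrences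
instance (s : String) (substring : String) (occurrences : List Int) (out : String) : Decidable (Spec_keep_specific_occurrences s substring occurrences out) := by unfold Spec_keep_specific_occurrences; infer_instance

-- ===== CLAIM (what is proved, stated in full; the proofs are below) =====
def Claim_equal_keep_specific_occurrences : Prop := ∀ (s : String) (substring : String) (occurrences : List Int), Dom_keep_specific_occurrences s substring occurrences → Pre_keep_specific_occurrences s substring occurrences → Spec_keep_specific_occurrences s substring occurrences (keep_specific_occurrences s substring occurrences)

-- ===== LEMMAS AND PROOFS =====

-- reference splitter: split by first occurrence, via find
def sfind (sub : List Char) (l : List Char) : List (List Char) :=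
  if hs : sub = [] then [l]
  else
    let f := PySem.Chars.find l sub
    if hf : f = -1 then [l]
    else l.take f.toNat :: sfind sub (l.drop (f.toNat + sub.length))
termination_by l.length
decreasing_by
  have hinf : sub <:+: l := (PySem.Chars.find_ne_neg_one_iff l sub).mp hf
  have hlen : sub.length ≤ l.length := List.IsInfix.length_le hinf
  have : 1 ≤ sub.length := by cases sub with | nil => exact absurd rfl hs | cons a t => simp
  simp only [List.length_drop]
  omega

-- the glue pass: (sep if i in occ else "") ++ part, i counting up
def glue (sub : List Char) (occ : List Int) : Nat → List (List Char) → List Char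
  | _, [] => []
  | i, p :: rest => (if ((i : Int)) ∈ occ then sub else []) ++ p ++ glue sub occ (i + 1) rest

def hgl (sub : List Char) (occ : List Int) (count : Nat) : List (List Char) → List Char
  | [] => []
  | p :: rest => p ++ glue sub occ (count + 1) rest

theorem sfind_not_found {sub l : List Char} (hs : sub ≠ [])
    (hf : PySem.Chars.find l sub = -1) : sfind sub l = [l] := by
  rw [sfind]; simp [hs, hf]

theorem sfind_found {sub l : List Char} (hs : sub ≠ [])
    (hf : PySem.Chars.find l sub ≠ -1) :
    sfind sub l = l.take (PySem.Chars.find l sub).toNat ::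
      sfind sub (l.drop ((PySem.Chars.find l sub).toNat + sub.length)) := by
  rw [sfind]; simp [hs, hf]

theorem sfind_ne_nil (sub l : List Char) : sfind sub l ≠ [] := by
  by_cases hs : sub = []
  · rw [sfind]; simp [hs]
  · by_cases hf : PySem.Chars.find l sub = -1
    · rw [sfind_not_found hs hf]; simp
    · rw [sfind_found hs hf]; simp

theorem sub_length_pos {sub : List Char} (hs : sub ≠ []) : 1 ≤ sub.length := by
  cases sub with
  | nil => exact absurd rfl hs
  | cons a t => simp

theorem find_nil_of_ne {sub : List Char} (hs : sub ≠ []) :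
    PySem.Chars.find ([] : List Char) sub = -1 := by
  rw [PySem.Chars.find_eq_neg_one_iff]
  intro hinf
  exact hs (List.eq_nil_of_infix_nil hinf)

theorem join_nil_eq_flatten (ps : List (List Char)) : PySem.Chars.join [] ps = ps.flatten := by
  simp only [PySem.Chars.join, List.intercalate]
  induction ps with
  | nil => simp
  | cons p r ih =>
    cases r with
    | nil => simp
    | cons q r' => simpa [List.intersperse] using ih

theorem find_of_prefix {sub l : List Char} (hp : sub <+: l) : PySem.Chars.find l sub = 0 := by
  have h0 : 0 ≤ PySem.Chars.find l sub :=
    (PySem.Chars.find_nonneg_iff l sub).mpr hp.isInfix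
  obtain ⟨-, hmin⟩ := PySem.Chars.find_spec h0
  by_contra hne
  have hgt : 0 < (PySem.Chars.find l sub).toNat := by omega
  exact hmin 0 hgt (by simpa using hp)

theorem find_cons_not_prefix {sub : List Char} (c : Char) (rest : List Char)
    (hp : ¬ sub <+: (c :: rest)) :
    PySem.Chars.find (c :: rest) sub =
      if PySem.Chars.find rest sub = -1 then -1 else PySem.Chars.find rest sub + 1 := by
  split_ifs with h
  · rw [PySem.Chars.find_eq_neg_one_iff] at h ⊢
    intro hinf
    rw [List.infix_iff_prefix_suffix] at hinf
    obtain ⟨t, hpt, hts⟩ := hinf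
    rw [List.suffix_cons_iff] at hts
    cases hts with
    | inl hts => exact hp (hts ▸ hpt)
    | inr hts => exact h (List.infix_iff_prefix_suffix.mpr ⟨t, hpt, hts⟩)
  · have hfr0 : 0 ≤ PySem.Chars.find rest sub := by
      have := PySem.Chars.neg_one_le_find rest sub; omega
    obtain ⟨hpre, hmin⟩ := PySem.Chars.find_spec hfr0
    have hocc : sub <+: (c :: rest).drop ((PySem.Chars.find rest sub).toNat + 1) := by
      simpa using hpre
    have h0 : 0 ≤ PySem.Chars.find (c :: rest) sub := by
      rw [PySem.Chars.find_nonneg_iff]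
      exact List.infix_iff_prefix_suffix.mpr
        ⟨(c :: rest).drop ((PySem.Chars.find rest sub).toNat + 1), hocc, List.drop_suffix _ _⟩
    obtain ⟨hpre2, hmin2⟩ := PySem.Chars.find_spec h0
    have hle : (PySem.Chars.find (c :: rest) sub).toNat ≤ (PySem.Chars.find rest sub).toNat + 1 := by
      by_contra hgt
      exact hmin2 ((PySem.Chars.find rest sub).toNat + 1) (by omega) hocc
    have hne0 : (PySem.Chars.find (c :: rest) sub).toNat ≠ 0 := by
      intro h0'
      apply hp
      have h2 := hpre2
      rw [h0'] at h2
      simpa using h2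
    have hge : (PySem.Chars.find rest sub).toNat ≤ (PySem.Chars.find (c :: rest) sub).toNat - 1 := by
      by_contra hlt
      apply hmin ((PySem.Chars.find (c :: rest) sub).toNat - 1) (by omega)
      have hdrop : (c :: rest).drop ((PySem.Chars.find (c :: rest) sub).toNat)
          = rest.drop ((PySem.Chars.find (c :: rest) sub).toNat - 1) := by
        cases hm : (PySem.Chars.find (c :: rest) sub).toNat with
        | zero => exact absurd hm hne0
        | succ k => simp
      rw [hdrop] at hpre2
      exact hpre2
    omega

theorem splitOn_go_eq (sub : List Char) (hs : sub ≠ []) :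
    ∀ fuel l cur acc, l.length < fuel →
      PySem.Chars.splitOn.go sub fuel l cur acc =
        acc.reverse ++ (match sfind sub l with
          | [] => []
          | p :: rest => (cur.reverse ++ p) :: rest) := by
  intro fuel
  induction fuel with
  | zero => intro l cur acc h; omega
  | succ fuel ih =>
    intro l cur acc h
    cases l with
    | nil =>
      rw [PySem.Chars.splitOn.go.eq_2 sub (fuel + 1) cur acc (by omega)]
      rw [sfind_not_found hs (find_nil_of_ne hs)]
      simp
    | cons c rest =>
      rw [PySem.Chars.splitOn.go.eq_3]
      by_cases hp : sub.isPrefixOf (c :: rest) = true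
      · rw [if_pos hp]
        have hpre : sub <+: (c :: rest) := List.isPrefixOf_iff_prefix.mp hp
        have hf0 : PySem.Chars.find (c :: rest) sub = 0 := find_of_prefix hpre
        have hlen : (List.drop sub.length (c :: rest)).length < fuel := by
          have h1 := sub_length_pos hs
          simp only [List.length_drop, List.length_cons] at h ⊢
          omega
        rw [ih _ [] (cur.reverse :: acc) hlen]
        have hne1 : PySem.Chars.find (c :: rest) sub ≠ -1 := by omega
        conv_rhs => rw [sfind_found hs hne1]
        rw [hf0]
        simp only [Int.toNat_zero, List.take_zero, Nat.zero_add]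
        have hne := sfind_ne_nil sub ((c :: rest).drop sub.length)
        cases hsf : sfind sub ((c :: rest).drop sub.length) with
        | nil => exact absurd hsf hne
        | cons q r' =>
          simp
      · rw [if_neg hp]
        have hnp : ¬ sub <+: (c :: rest) := fun hx => hp (List.isPrefixOf_iff_prefix.mpr hx)
        have hlen : rest.length < fuel := by
          simp only [List.length_cons] at h; omega
        rw [ih rest (c :: cur) acc hlen]
        have hfc := find_cons_not_prefix c rest hnp
        by_cases hfr : PySem.Chars.find rest sub = -1
        · rw [if_pos hfr] at hfc
          rw [sfind_not_found hs hfr, sfind_not_found hs hfc]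
          simp
        · rw [if_neg hfr] at hfc
          have hfr0 : 0 ≤ PySem.Chars.find rest sub := by
            have := PySem.Chars.neg_one_le_find rest sub; omega
          have hfc_ne : PySem.Chars.find (c :: rest) sub ≠ -1 := by omega
          rw [sfind_found hs hfr, sfind_found hs hfc_ne, hfc]
          have htoNat : (PySem.Chars.find rest sub + 1).toNat
              = (PySem.Chars.find rest sub).toNat + 1 := by omega
          have htake : (c :: rest).take ((PySem.Chars.find rest sub).toNat + 1)
              = c :: rest.take (PySem.Chars.find rest sub).toNat := by simp
          have hdrop : (c :: rest).drop ((PySem.Chars.find rest sub).toNat + 1 + sub.length)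
              = rest.drop ((PySem.Chars.find rest sub).toNat + sub.length) := by
            rw [Nat.add_right_comm]; simp
          rw [htoNat, htake, hdrop]
          show acc.reverse ++ ((c :: cur).reverse ++ List.take (PySem.Chars.find rest sub).toNat rest) ::
              sfind sub (List.drop ((PySem.Chars.find rest sub).toNat + sub.length) rest)
            = acc.reverse ++ (cur.reverse ++ (c :: List.take (PySem.Chars.find rest sub).toNat rest)) ::
              sfind sub (List.drop ((PySem.Chars.find rest sub).toNat + sub.length) rest)
          simp

theorem splitOn_eq_sfind (sub l : List Char) (hs : sub ≠ []) :
    PySem.Chars.splitOn l sub = sfind sub l := by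
  have h := splitOn_go_eq sub hs (l.length + 1) l [] [] (by omega)
  have hne := sfind_ne_nil sub l
  cases hsf : sfind sub l with
  | nil => exact absurd hsf hne
  | cons p rest =>
    simp [PySem.Chars.splitOn, h, hsf]

theorem goA_flatten (s sub : List Char) (occ : List Int) (hs : sub ≠ []) :
    ∀ fuel k count parts, k ≤ s.length → s.length - k < fuel →
      (goA s sub occ fuel count (k : Int) parts).flatten =
        parts.flatten ++ hgl sub occ count (sfind sub (s.drop k)) := by
  intro fuel
  induction fuel with
  | zero => intro k count parts hk hfuel; omega
  | succ fuel ih =>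
    intro k count parts hk hfuel
    have hfind := PySem.Chars.findFrom_natCast s sub k hk
    by_cases hf : PySem.Chars.find (s.drop k) sub = -1
    · have hidx : PySem.Chars.findFrom s sub (k : Int) none = -1 := by
        rw [hfind, if_pos hf]
      rw [goA, sfind_not_found hs hf]
      simp only [hidx]
      simp [hgl, glue, PySem.List.slice_from_natCast]
    · have hf0 : 0 ≤ PySem.Chars.find (s.drop k) sub := by
        have := PySem.Chars.neg_one_le_find (s.drop k) sub; omega
      obtain ⟨hpre, -⟩ := PySem.Chars.find_spec hf0
      have hsublen : sub.length ≤ (s.drop k).length - (PySem.Chars.find (s.drop k) sub).toNat := by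
        have h1 := hpre.length_le
        simp only [List.length_drop] at h1 ⊢
        omega
      have hfle : PySem.Chars.find (s.drop k) sub ≤ (s.drop k).length :=
        PySem.Chars.find_le_length _ _
      have hlen1 : (PySem.Chars.find (s.drop k) sub).toNat + sub.length ≤ s.length - k := by
        simp only [List.length_drop] at hsublen hfle
        omega
      have hspos := sub_length_pos hs
      have hk'le : k + (PySem.Chars.find (s.drop k) sub).toNat + sub.length ≤ s.length := by omega
      have hidx : PySem.Chars.findFrom s sub (k : Int) none
          = (k : Int) + PySem.Chars.find (s.drop k) sub := by
        rw [hfind, if_neg hf]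
      have hne1 : ((k : Int) + PySem.Chars.find (s.drop k) sub) ≠ -1 := by omega
      have hcast : ((k : Int) + PySem.Chars.find (s.drop k) sub + (sub.length : Int))
          = ((k + (PySem.Chars.find (s.drop k) sub).toNat + sub.length : Nat) : Int) := by
        push_cast
        omega
      have hslice1 : PySem.Chars.slice s (some (k : Int))
            (some ((k + (PySem.Chars.find (s.drop k) sub).toNat + sub.length : Nat) : Int))
          = (s.drop k).take ((PySem.Chars.find (s.drop k) sub).toNat + sub.length) := by
        simp only [PySem.Chars.slice_eq_listSlice]
        rw [PySem.List.slice_toNat _ (by omega) (by omega)]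
        simp only [Int.toNat_natCast]
        congr 1
        omega
      have hslice2 : PySem.Chars.slice s (some (k : Int))
            (some ((k : Int) + PySem.Chars.find (s.drop k) sub))
          = (s.drop k).take (PySem.Chars.find (s.drop k) sub).toNat := by
        simp only [PySem.Chars.slice_eq_listSlice]
        rw [PySem.List.slice_toNat _ (by omega) (by omega)]
        simp only [Int.toNat_natCast]
        congr 1
        omega
      have htake : (s.drop k).take ((PySem.Chars.find (s.drop k) sub).toNat + sub.length)
          = (s.drop k).take (PySem.Chars.find (s.drop k) sub).toNat ++ sub := by
        rw [List.take_add]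
        congr 1
        obtain ⟨r, hr⟩ := hpre
        rw [← hr, List.take_left]
      have hdropk' : (s.drop k).drop ((PySem.Chars.find (s.drop k) sub).toNat + sub.length)
          = s.drop (k + (PySem.Chars.find (s.drop k) sub).toNat + sub.length) := by
        rw [List.drop_drop]
        congr 1
        omega
      rw [goA]
      simp only [hidx, if_neg hne1, hcast, hslice1, hslice2]
      rw [sfind_found hs hf, hdropk']
      have hne2 := sfind_ne_nil sub (s.drop (k + (PySem.Chars.find (s.drop k) sub).toNat + sub.length))
      cases hsf : sfind sub (s.drop (k + (PySem.Chars.find (s.drop k) sub).toNat + sub.length)) with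
      | nil => exact absurd hsf hne2
      | cons q r =>
        split_ifs with hmem
        · rw [ih _ (count + 1) _ hk'le (by omega), hsf]
          simp only [hgl, glue, htake, if_pos hmem]
          simp
        · rw [ih _ (count + 1) _ hk'le (by omega), hsf]
          simp only [hgl, glue, if_neg hmem]
          simp

theorem goB_flatten (sub : List Char) (occ : List Int) :
    ∀ l i pieces, (goB sub occ i pieces l).flatten = pieces.flatten ++ glue sub occ i l := by
  intro l
  induction l with
  | nil => intro i pieces; simp [goB, glue]
  | cons p rest ih =>
    intro i pieces
    simp only [goB, glue]
    split_ifs with h <;> simp [ih]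

-- ===== VERDICT (by name: the statement is the Claim_ definition above) =====
theorem keep_specific_occurrences_spec : Claim_equal_keep_specific_occurrences := by
  intro s substring occ _ hpre
  unfold Spec_keep_specific_occurrences
  have hs : substring.toList ≠ [] := by
    intro h
    exact hpre (String.toList_eq_nil_iff.mp h)
  unfold keep_specific_occurrences keep_specific_occurrences_alt
  have hA := goA_flatten s.toList substring.toList occ hs (s.toList.length + 1) 0 0 [] (by omega) (by omega)
  rw [splitOn_eq_sfind _ _ hs]
  have hne := sfind_ne_nil substring.toList s.toList
  cases hsf : sfind substring.toList s.toList with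
  | nil => exact absurd hsf hne
  | cons p0 rest =>
    simp only [join_nil_eq_flatten]
    rw [goB_flatten]
    simp only [List.drop_zero] at hA
    rw [hsf] at hA
    simp only [hgl, List.flatten_nil, List.nil_append] at hA
    congr 1
    simp only [Nat.cast_zero] at hA
    rw [hA]
    simp
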